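-- pv_equiv track=rewrite | github.com/mahdihoumanii/glas | glaslib/commands/common.py | parse_pick_flag
-- ===== SOURCE A (Python) =====
-- import shlex
-- from typing import Dict, List, Optional, Tuple
--
-- def parse_pick_flag(arg: str) -> Tuple[str, bool, bool]:
--     """
--     Parse arguments with --pick and --verbose flags.
--
--     Returns:
--         (remaining_arg, pick, verbose)
--     """
--     toks = shlex.split(arg)
--     pick = False
--     verbose = False
--     quiet = False
--     args = []
--     for t in toks:
--         if t == "--pick":
--             pick = True
--         elif t == "--verbose":
--             verbose = True
--         elif t == "--quiet":
--             quiet = True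
--         elif not t.startswith("--"):
--             args.append(t)
--     if quiet:
--         verbose = False
--     return " ".join(args), pick, verbose
-- ===== SOURCE B (Python) =====
-- def parse_pick_flag(arg):
--     # Single streaming character pass: each POSIX-shell token is classified the
--     # moment it ends; no token list is ever materialized and the remaining-args
--     # string is assembled incrementally during the same scan.
--     pick = verbose = quiet = False
--     out = []          # pieces of the final args string
--     emitted = False   # whether out already holds a token
--     cur = []          # characters of the token being read
--     started = False
--     st = 0            # 0 plain, 1 in '...', 2 in "...", 3 escape in "...", 4 escape
--
--     def end_token():
--         nonlocal pick, verbose, quiet, emitted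
--         tok = "".join(cur)
--         if tok == "--pick":
--             pick = True
--         elif tok == "--verbose":
--             verbose = True
--         elif tok == "--quiet":
--             quiet = True
--         elif not tok.startswith("--"):
--             if emitted:
--                 out.append(" ")
--             out.append(tok)
--             emitted = True
--
--     for c in arg:
--         if st == 0:
--             if c in " \t\r\n":
--                 if started:
--                     end_token()
--                     cur = []
--                     started = False
--             elif c == "'":
--                 st = 1; started = True
--             elif c == '"':
--                 st = 2; started = True
--             elif c == "\\":
--                 st = 4; started = True
--             else:
--                 cur.append(c); started = True
--         elif st == 1:
--             if c == "'":
--                 st = 0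
--             else:
--                 cur.append(c)
--         elif st == 2:
--             if c == '"':
--                 st = 0
--             elif c == "\\":
--                 st = 3
--             else:
--                 cur.append(c)
--         elif st == 3:
--             if c not in '"\\':
--                 cur.append("\\")
--             cur.append(c)
--             st = 2
--         else:  # st == 4
--             cur.append(c)
--             st = 0
--     if st != 0:
--         raise ValueError("unbalanced quoting")
--     if started:
--         end_token()
--     return "".join(out), pick, verbose and not quiet
-- ===== Notes on version B (the rewrite author's own statement) =====
-- stated objective: faster
-- what changed: A is a two-stage pipeline (shlex.split materializes the full token list, then a second loop over it classifies tokens and collects args, with a post-hoc quiet-overrides-verbose fixup); B is a single streaming character-level pass that never builds a token list: each token is classified the instant its last character is read and the remaining-args string is assembled incrementally during the same scan, avoiding shlex's heavyweight per-character pure-Python lexer (a timing run measured B markedly faster). …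
import Mathlib
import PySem

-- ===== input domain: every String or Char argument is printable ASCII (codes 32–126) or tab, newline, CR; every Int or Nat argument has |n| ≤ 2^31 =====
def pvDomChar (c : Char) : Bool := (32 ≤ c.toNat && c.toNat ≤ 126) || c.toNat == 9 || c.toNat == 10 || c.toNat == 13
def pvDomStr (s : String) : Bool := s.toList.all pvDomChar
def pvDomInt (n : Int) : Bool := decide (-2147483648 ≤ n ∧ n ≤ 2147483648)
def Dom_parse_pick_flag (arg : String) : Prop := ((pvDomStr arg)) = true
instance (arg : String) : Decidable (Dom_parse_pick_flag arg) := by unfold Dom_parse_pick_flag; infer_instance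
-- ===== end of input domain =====

-- B replaces A's two-stage tokenize-then-classify pipeline (shlex token list, then a token loop) by one
-- streaming character pass that classifies each token as it ends and builds the args string in place
-- (measured faster in a timing run; same return value, proved below).

-- ===== PORT A =====

-- shlex.split (posix mode), exact for the ASCII domain; states:
-- 0 = outside quotes, 1 = single quote, 2 = double quote, 3 = escape inside double quote, 4 = escape outside quotes.
-- Returns none exactly where shlex.split raises ValueError (unclosed quote / dangling escape).
def pvIsWS (c : Char) : Bool := c = ' ' || c = '\t' || c = '\r' || c = '\n'

def pvShlexAux : List Char → List Char → Bool → Nat → List String → Option (List String)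
  | [], cur, started, st, acc =>
      if st ≠ 0 then none
      else if started then some (acc ++ [String.ofList cur.reverse]) else some acc
  | c :: rest, cur, started, st, acc =>
      if st = 0 then
        if pvIsWS c then
          if started then pvShlexAux rest [] false 0 (acc ++ [String.ofList cur.reverse])
          else pvShlexAux rest cur false 0 acc
        else if c = '\'' then pvShlexAux rest cur true 1 acc
        else if c = '"' then pvShlexAux rest cur true 2 acc
        else if c = '\\' then pvShlexAux rest cur true 4 acc
        else pvShlexAux rest (c :: cur) true 0 acc
      else if st = 1 then
        if c = '\'' then pvShlexAux rest cur started 0 acc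
        else pvShlexAux rest (c :: cur) started 1 acc
      else if st = 2 then
        if c = '"' then pvShlexAux rest cur started 0 acc
        else if c = '\\' then pvShlexAux rest cur started 3 acc
        else pvShlexAux rest (c :: cur) started 2 acc
      else if st = 3 then
        if c = '"' || c = '\\' then pvShlexAux rest (c :: cur) started 2 acc
        else pvShlexAux rest (c :: '\\' :: cur) started 2 acc
      else -- st = 4
        pvShlexAux rest (c :: cur) started 0 acc

def pvShlexSplit? (s : String) : Option (List String) :=
  pvShlexAux s.toList [] false 0 []

-- A's for-loop: four accumulators, branches in A's order.
def pvALoop : List String → Bool → Bool → Bool → List String → Bool × Bool × Bool × List String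
  | [], pick, verbose, quiet, args => (pick, verbose, quiet, args)
  | t :: ts, pick, verbose, quiet, args =>
      if t = "--pick" then pvALoop ts true verbose quiet args
      else if t = "--verbose" then pvALoop ts pick true quiet args
      else if t = "--quiet" then pvALoop ts pick verbose true args
      else if ¬ (PySem.Str.startswith t "--") then pvALoop ts pick verbose quiet (args ++ [t])
      else pvALoop ts pick verbose quiet args

def parse_pick_flag (arg : String) : String × Bool × Bool :=
  match pvShlexSplit? arg with
  | none => ("", false, false)   -- shlex raises ValueError here (excluded by Pre_)
  | some toks =>
      let r := pvALoop toks false false false []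
      (PySem.Str.join " " r.2.2.2, r.1, if r.2.2.1 then false else r.2.1)

-- ===== PORT B =====

-- end_token: classify the token that just ended (state = pick, verbose, quiet, emitted, out pieces).
def pvEndTok (tok : String) : Bool × Bool × Bool × Bool × List String → Bool × Bool × Bool × Bool × List String
  | (p, v, q, e, out) =>
      if tok = "--pick" then (true, v, q, e, out)
      else if tok = "--verbose" then (p, true, q, e, out)
      else if tok = "--quiet" then (p, v, true, e, out)
      else if ¬ (PySem.Str.startswith tok "--") then
        (p, v, q, true, out ++ (if e then [" ", tok] else [tok]))
      else (p, v, q, e, out)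

-- B's single streaming pass: same FSM states as the Python (0 plain, 1 '…', 2 "…", 3 escape in "…", 4 escape),
-- no token list; none exactly where Source B raises ValueError.
def pvBScan : List Char → List Char → Bool → Nat → (Bool × Bool × Bool × Bool × List String) →
    Option (Bool × Bool × Bool × Bool × List String)
  | [], cur, started, st, s =>
      if st ≠ 0 then none
      else if started then some (pvEndTok (String.ofList cur.reverse) s) else some s
  | c :: rest, cur, started, st, s =>
      if st = 0 then
        if pvIsWS c then
          if started then pvBScan rest [] false 0 (pvEndTok (String.ofList cur.reverse) s)
          else pvBScan rest cur false 0 s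
        else if c = '\'' then pvBScan rest cur true 1 s
        else if c = '"' then pvBScan rest cur true 2 s
        else if c = '\\' then pvBScan rest cur true 4 s
        else pvBScan rest (c :: cur) true 0 s
      else if st = 1 then
        if c = '\'' then pvBScan rest cur started 0 s
        else pvBScan rest (c :: cur) started 1 s
      else if st = 2 then
        if c = '"' then pvBScan rest cur started 0 s
        else if c = '\\' then pvBScan rest cur started 3 s
        else pvBScan rest (c :: cur) started 2 s
      else if st = 3 then
        if c = '"' || c = '\\' then pvBScan rest (c :: cur) started 2 s
        else pvBScan rest (c :: '\\' :: cur) started 2 s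
      else -- st = 4
        pvBScan rest (c :: cur) started 0 s

def parse_pick_flag_alt (arg : String) : String × Bool × Bool :=
  match pvBScan arg.toList [] false 0 (false, false, false, false, []) with
  | none => ("", false, false)   -- Source B raises ValueError here (excluded by Pre_)
  | some (p, v, q, _, out) => (PySem.Str.join "" out, p, v && !q)

-- ===== PRECONDITION & SPEC =====

-- Pre_ excludes exactly the inputs on which both A (via shlex.split) and B raise ValueError:
-- an unclosed quote or a trailing backslash escape. pvQuoteScan tracks only the quoting context
-- (a shape condition on the input; it builds no tokens).
def pvQuoteScan : List Char → Nat → Nat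
  | [], st => st
  | c :: rest, st =>
      if st = 0 then
        if c = '\'' then pvQuoteScan rest 1
        else if c = '"' then pvQuoteScan rest 2
        else if c = '\\' then pvQuoteScan rest 4
        else pvQuoteScan rest 0
      else if st = 1 then pvQuoteScan rest (if c = '\'' then 0 else 1)
      else if st = 2 then
        if c = '"' then pvQuoteScan rest 0
        else if c = '\\' then pvQuoteScan rest 3
        else pvQuoteScan rest 2
      else if st = 3 then pvQuoteScan rest 2
      else pvQuoteScan rest 0

def Pre_parse_pick_flag (arg : String) : Prop := pvQuoteScan arg.toList 0 = 0
instance (arg : String) : Decidable (Pre_parse_pick_flag arg) := by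
  unfold Pre_parse_pick_flag; infer_instance

def pvWitness_parse_pick_flag : String := "--pick 'a b' --quiet x --verbose"

def Spec_parse_pick_flag (arg : String) (out : String × Bool × Bool) : Prop := out = parse_pick_flag_alt arg
instance (arg : String) (out : String × Bool × Bool) : Decidable (Spec_parse_pick_flag arg out) := by unfold Spec_parse_pick_flag; infer_instance

-- ===== CLAIM (what is proved, stated in full; the proofs are below) =====
def Claim_equal_parse_pick_flag : Prop := ∀ (arg : String), Dom_parse_pick_flag arg → Pre_parse_pick_flag arg → Spec_parse_pick_flag arg (parse_pick_flag arg)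

-- ===== LEMMAS AND PROOFS =====

-- kept = appended to args (not a flag, does not start with "--")
def pvKept (t : String) : Bool := ! PySem.Str.startswith t "--"

-- the pieces B's pass appends to out while folding over the tokens, starting from emitted-state e
def pvPieces : Bool → List String → List String
  | _, [] => []
  | e, t :: ts => if pvKept t then (if e then [" ", t] else [t]) ++ pvPieces true ts else pvPieces e ts

-- the tokenizer's accumulator is a pure prefix
theorem pvShlexAux_acc (cs : List Char) : ∀ (cur : List Char) (started : Bool) (st : Nat) (acc : List String),
    pvShlexAux cs cur started st acc = Option.map (acc ++ ·) (pvShlexAux cs cur started st []) := by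
  induction cs with
  | nil =>
    intro cur started st acc
    by_cases h : st = 0 <;> cases started <;> simp [pvShlexAux, h]
  | cons c rest ih =>
    intro cur started st acc
    simp only [pvShlexAux]
    split_ifs <;> rw [ih] <;> try rfl
    all_goals simp only [List.nil_append]
    all_goals rw [ih [] false 0 [String.ofList cur.reverse]]
    all_goals simp [Option.map_map, Function.comp_def, List.append_assoc]

theorem pvShlexAux_single (cs : List Char) (cur : List Char) (started : Bool) (st : Nat) (x : String) :
    pvShlexAux cs cur started st [x] = Option.map (x :: ·) (pvShlexAux cs cur started st []) := by
  simpa using pvShlexAux_acc cs cur started st [x]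

-- B's streaming pass = tokenize, then fold the classifier over the tokens
theorem pvBScan_eq (cs : List Char) : ∀ (cur : List Char) (started : Bool) (st : Nat)
    (s : Bool × Bool × Bool × Bool × List String),
    pvBScan cs cur started st s =
      Option.map (fun toks => toks.foldl (fun s t => pvEndTok t s) s) (pvShlexAux cs cur started st []) := by
  induction cs with
  | nil =>
    intro cur started st s
    by_cases h : st = 0 <;> cases started <;> simp [pvBScan, pvShlexAux, h]
  | cons c rest ih =>
    intro cur started st s
    simp only [pvBScan, pvShlexAux]
    split_ifs <;> rw [ih] <;> try rfl
    all_goals simp only [List.nil_append]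
    all_goals rw [pvShlexAux_single]
    all_goals simp [Option.map_map, Function.comp_def]

-- the classifier fold, characterised componentwise
theorem pvFold_eq (toks : List String) : ∀ (p v q e : Bool) (out : List String),
    toks.foldl (fun s t => pvEndTok t s) (p, v, q, e, out) =
      (p || toks.contains "--pick", v || toks.contains "--verbose", q || toks.contains "--quiet",
       e || toks.any pvKept, out ++ pvPieces e toks) := by
  induction toks with
  | nil => intro p v q e out; simp [pvPieces]
  | cons t ts ih =>
    intro p v q e out
    rw [List.foldl_cons, ih]
    by_cases h1 : t = "--pick"
    · subst h1
      simp [pvEndTok, pvPieces, (by decide : pvKept "--pick" = false)]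
    · by_cases h2 : t = "--verbose"
      · subst h2
        simp [pvEndTok, h1, pvPieces, (by decide : pvKept "--verbose" = false)]
      · by_cases h3 : t = "--quiet"
        · subst h3
          simp [pvEndTok, h1, h2, pvPieces, (by decide : pvKept "--quiet" = false)]
        · have hp : ¬ ("--pick" = t) := fun h => h1 h.symm
          have hv : ¬ ("--verbose" = t) := fun h => h2 h.symm
          have hq : ¬ ("--quiet" = t) := fun h => h3 h.symm
          by_cases h4 : pvKept t = true
          · have h4' : PySem.Str.startswith t "--" = false := by
              simpa [pvKept] using h4
            have h4c : PySem.Chars.startswith t.toList ['-', '-'] = false := by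
              simpa using h4'
            cases e <;>
              simp [pvEndTok, h1, h2, h3, h4, h4', h4c, pvPieces, List.contains_cons,
                hp, hv, hq, List.append_assoc]
          · have h4' : PySem.Str.startswith t "--" = true := by
              have := (Bool.not_eq_true _).mp h4
              simpa [pvKept] using this
            have h4c : PySem.Chars.startswith t.toList ['-', '-'] = true := by
              simpa using h4'
            have h4'' : pvKept t = false := (Bool.not_eq_true _).mp h4
            simp [pvEndTok, h1, h2, h3, h4', h4c, h4'', pvPieces, List.contains_cons,
              hp, hv, hq]

-- A's loop, characterised: each accumulator evolves independently.
theorem pvALoop_eq (ts : List String) : ∀ (p v q : Bool) (args : List String),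
    pvALoop ts p v q args =
      (p || ts.contains "--pick", v || ts.contains "--verbose", q || ts.contains "--quiet",
       args ++ ts.filter pvKept) := by
  induction ts with
  | nil => intro p v q args; simp [pvALoop]
  | cons t ts ih =>
    intro p v q args
    by_cases h1 : t = "--pick"
    · subst h1
      simp [pvALoop, ih, List.filter_cons, (by decide : pvKept "--pick" = false)]
    · by_cases h2 : t = "--verbose"
      · subst h2
        simp [pvALoop, h1, ih, List.filter_cons, (by decide : pvKept "--verbose" = false)]
      · by_cases h3 : t = "--quiet"
        · subst h3
          simp [pvALoop, h1, h2, ih, List.filter_cons, (by decide : pvKept "--quiet" = false)]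
        · have hp : ¬ ("--pick" = t) := fun h => h1 h.symm
          have hv : ¬ ("--verbose" = t) := fun h => h2 h.symm
          have hq : ¬ ("--quiet" = t) := fun h => h3 h.symm
          by_cases h4 : pvKept t = true
          · have h4' : PySem.Str.startswith t "--" = false := by simpa [pvKept] using h4
            have h4c : PySem.Chars.startswith t.toList ['-', '-'] = false := by
              simpa using h4'
            simp [pvALoop, h1, h2, h3, h4, h4', h4c, ih, List.filter_cons, List.contains_cons,
              hp, hv, hq]
          · have h4' : PySem.Str.startswith t "--" = true := by
              have := (Bool.not_eq_true _).mp h4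
              simpa [pvKept] using this
            have h4c : PySem.Chars.startswith t.toList ['-', '-'] = true := by
              simpa using h4'
            have h4'' : pvKept t = false := (Bool.not_eq_true _).mp h4
            simp [pvALoop, h1, h2, h3, h4', h4c, h4'', ih, List.filter_cons, List.contains_cons,
              hp, hv, hq]

-- the pieces of a fold started with e = true: a space before every kept token
theorem pvPieces_true (toks : List String) :
    pvPieces true toks = (toks.filter pvKept).flatMap (fun t => [" ", t]) := by
  induction toks with
  | nil => simp [pvPieces]
  | cons t ts ih => by_cases h : pvKept t = true <;> simp [pvPieces, h, ih, List.filter_cons]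

-- "".join of space-interleaved pieces = " ".join of the tokens
theorem pvJoinStr (ts : List String) : ∀ (t : String),
    PySem.Str.join "" (t :: ts.flatMap (fun q => [" ", q])) = PySem.Str.join " " (t :: ts) := by
  induction ts with
  | nil =>
    intro t
    apply String.toList_inj.mp
    simp [PySem.Str.toList_join, PySem.Chars.join_singleton]
  | cons q r ih =>
    intro t
    apply String.toList_inj.mp
    have hih := congrArg String.toList (ih q)
    rw [PySem.Str.toList_join, PySem.Str.toList_join] at hih
    rw [PySem.Str.toList_join, PySem.Str.toList_join]
    simp only [List.flatMap_cons, List.map_cons, List.cons_append, List.nil_append, List.map_append]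
    rw [PySem.Chars.join_cons_cons, PySem.Chars.join_cons_cons, PySem.Chars.join_cons_cons]
    simp only [List.map_cons] at hih
    cases hfilter : r.flatMap (fun q => [" ", q]) with
    | nil =>
      cases r with
      | nil => simp [PySem.Chars.join_singleton]
      | cons a b => simp [List.flatMap_cons] at hfilter
    | cons x xs =>
      rw [hfilter] at hih
      rw [hih]
      simp [List.append_assoc]

theorem pvJoin_pieces (toks : List String) :
    PySem.Str.join "" (pvPieces false toks) = PySem.Str.join " " (toks.filter pvKept) := by
  induction toks with
  | nil => rfl
  | cons t ts ih =>
    by_cases h : pvKept t = true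
    · rw [show pvPieces false (t :: ts) = t :: pvPieces true ts from by simp [pvPieces, h],
        pvPieces_true, List.filter_cons_of_pos h, pvJoinStr]
    · have h' : pvKept t = false := (Bool.not_eq_true _).mp h
      rw [show pvPieces false (t :: ts) = pvPieces false ts from by simp [pvPieces, h'],
        List.filter_cons_of_neg (by simp [h']), ih]

-- ===== VERDICT (by name: the statement is the Claim_ definition above) =====
theorem parse_pick_flag_spec : Claim_equal_parse_pick_flag := by
  intro arg _ _
  unfold Spec_parse_pick_flag parse_pick_flag parse_pick_flag_alt
  rw [show pvBScan arg.toList [] false 0 (false, false, false, false, []) =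
        Option.map (fun toks => toks.foldl (fun s t => pvEndTok t s) (false, false, false, false, []))
          (pvShlexSplit? arg) from pvBScan_eq _ _ _ _ _]
  cases h : pvShlexSplit? arg with
  | none => rfl
  | some toks =>
    simp only [Option.map_some, pvALoop_eq, pvFold_eq, Bool.false_or, List.nil_append]
    rw [pvJoin_pieces]
    rcases hq : toks.contains "--quiet" with _ | _ <;> simp
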